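-- pv_equiv track=rewrite | github.com/adamsocki/z1000 | tools/z1000_export.py | get_object_type
-- ===== SOURCE A (Python) =====
-- def get_object_type(name):
--     """Determine object type from name"""
--     type_prefixes = {
--         "wall_": "wall",
--         "floor_": "floor",
--         "ceiling_": "ceiling",
--         "prop_": "prop",
--         "plane_": "plane",
--         "cube_": "cube"
--     }
--
--     name_lower = name.lower()
--     for prefix, type_name in type_prefixes.items():
--         if name_lower.startswith(prefix):
--             return type_name
--
--     return "prop"  # default
-- ===== SOURCE B (Python) =====
-- def get_object_type(name):
--     """Determine object type from name"""
--     # Every entry of A's dict maps "X_" -> "X", so the answer is the part of the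
--     # (lowercased) name before the first underscore, if an underscore exists and
--     # that part is one of the known kinds; otherwise the default "prop".
--     head, sep, _tail = name.lower().partition("_")
--     if sep and head in ("wall", "floor", "ceiling", "prop", "plane", "cube"):
--         return head
--     return "prop"
-- ===== Notes on version B (the rewrite author's own statement) =====
-- stated objective: simpler
-- what changed: A loops over a six-entry dict testing startswith for each prefix; B has no dict and no loop: it partitions the lowercased name at the first underscore and returns the head itself if it is one of the six known kinds (each dict value equals its key minus the underscore), else 'prop'.
import Mathlib
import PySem

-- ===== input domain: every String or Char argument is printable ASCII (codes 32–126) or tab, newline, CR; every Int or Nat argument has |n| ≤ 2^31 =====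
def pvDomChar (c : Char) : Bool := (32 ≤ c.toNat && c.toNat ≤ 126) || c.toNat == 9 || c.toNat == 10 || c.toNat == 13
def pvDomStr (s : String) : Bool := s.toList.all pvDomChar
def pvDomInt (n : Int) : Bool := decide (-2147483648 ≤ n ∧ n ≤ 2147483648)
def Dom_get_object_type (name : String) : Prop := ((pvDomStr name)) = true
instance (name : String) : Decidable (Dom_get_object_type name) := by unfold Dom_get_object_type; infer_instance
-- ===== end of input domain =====

-- B drops A's dict and loop of startswith tests entirely: it splits the lowercased
-- name at the first underscore and returns the head itself when it is a known kind
-- (each dict value of A equals its key minus the underscore) — objective: simpler.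

-- ===== PORT A =====
-- the dict literal 'type_prefixes', in insertion order
def typePrefixesA : List (String × String) :=
  [("wall_", "wall"), ("floor_", "floor"), ("ceiling_", "ceiling"),
   ("prop_", "prop"), ("plane_", "plane"), ("cube_", "cube")]

-- 'for prefix, type_name in type_prefixes.items(): if name_lower.startswith(prefix): return type_name'
def loopA (items : List (String × String)) (name_lower : String) : String :=
  match items with
  | [] => "prop"  -- the default after the loop
  | (pfx, type_name) :: rest =>
      if PySem.Str.startswith name_lower pfx then type_name else loopA rest name_lower

def get_object_type (name : String) : String :=
  loopA typePrefixesA (PySem.Str.lower name)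

-- ===== PORT B =====
-- the tuple ("wall", "floor", "ceiling", "prop", "plane", "cube") of Source B
def knownKinds : List (List Char) :=
  [['w','a','l','l'], ['f','l','o','o','r'], ['c','e','i','l','i','n','g'],
   ['p','r','o','p'], ['p','l','a','n','e'], ['c','u','b','e']]

-- 'head, sep, _tail = name.lower().partition("_")': head is the part before the
-- first '_' (takeWhile), and 'sep' is truthy iff '_' occurs in the string.
def get_object_type_alt (name : String) : String :=
  let cs := (PySem.Str.lower name).toList
  let head := cs.takeWhile (fun c => c ≠ '_')
  if '_' ∈ cs ∧ head ∈ knownKinds then String.ofList head else "prop"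

-- ===== PRECONDITION & SPEC =====
def Spec_get_object_type (name : String) (out : String) : Prop := out = get_object_type_alt name
instance (name : String) (out : String) : Decidable (Spec_get_object_type name out) := by unfold Spec_get_object_type; infer_instance

-- ===== CLAIM =====
def Claim_equal_get_object_type : Prop := ∀ (name : String), Dom_get_object_type name → Spec_get_object_type name (get_object_type name)

-- ===== LEMMAS AND PROOFS =====

-- startswith the prefix 'w ++ "_"' (w underscore-free) means: s contains an underscore
-- and the maximal underscore-free head of s is exactly w
lemma prefix_underscore_iff (s : List Char) (w : List Char) (hw : '_' ∉ w) :
    (w ++ ['_']) <+: s ↔ ('_' ∈ s ∧ s.takeWhile (fun c => c ≠ '_') = w) := by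
  induction s generalizing w with
  | nil => simp
  | cons c s ih =>
      cases w with
      | nil =>
          by_cases hc : c = '_'
          · subst hc; simp [List.takeWhile]
          · constructor
            · intro h
              obtain ⟨h1, -⟩ := List.cons_prefix_cons.mp h
              exact absurd h1.symm hc
            · rintro ⟨-, h⟩
              rw [List.takeWhile_cons_of_pos (by simp [hc])] at h
              simp at h
      | cons d w' =>
          have hd : d ≠ '_' := fun h => hw (h ▸ List.mem_cons_self)
          have hw' : '_' ∉ w' := fun h => hw (List.mem_cons_of_mem _ h)
          simp only [List.cons_append, List.cons_prefix_cons, ih w' hw']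
          by_cases hc : c = '_'
          · subst hc
            constructor
            · rintro ⟨h, -⟩; exact absurd h hd
            · rintro ⟨-, h⟩
              rw [List.takeWhile_cons_of_neg (by simp)] at h
              simp at h
          · rw [List.takeWhile_cons_of_pos (by simp [hc])]
            simp only [List.mem_cons, Ne.symm hc, false_or, List.cons.injEq]
            tauto

-- ===== VERDICT =====
theorem get_object_type_spec : Claim_equal_get_object_type := by
  intro name _
  unfold Spec_get_object_type get_object_type get_object_type_alt
  set s : List Char := (PySem.Str.lower name).toList with hs
  set w : List Char := s.takeWhile (fun c => c ≠ '_') with hw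
  have hsw : ∀ (p : String), PySem.Str.startswith (PySem.Str.lower name) p
      = PySem.Chars.startswith s p.toList := by
    intro p; simp [hs]
  show loopA typePrefixesA (PySem.Str.lower name)
      = (if '_' ∈ s ∧ w ∈ knownKinds then String.ofList w else "prop")
  by_cases hu : '_' ∈ s
  · have hcond : ∀ (l : List Char), '_' ∉ l →
        PySem.Chars.startswith s (l ++ ['_']) = decide (w = l) := by
      intro l hl
      rw [Bool.eq_iff_iff, PySem.Chars.startswith_iff, prefix_underscore_iff s l hl]
      simp only [hu, true_and, decide_eq_true_eq]
      rw [← hw]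
    simp only [loopA, typePrefixesA, hsw]
    rw [show ("wall_" : String).toList = ['w','a','l','l'] ++ ['_'] from rfl,
        show ("floor_" : String).toList = ['f','l','o','o','r'] ++ ['_'] from rfl,
        show ("ceiling_" : String).toList = ['c','e','i','l','i','n','g'] ++ ['_'] from rfl,
        show ("prop_" : String).toList = ['p','r','o','p'] ++ ['_'] from rfl,
        show ("plane_" : String).toList = ['p','l','a','n','e'] ++ ['_'] from rfl,
        show ("cube_" : String).toList = ['c','u','b','e'] ++ ['_'] from rfl,
        hcond _ (by decide), hcond _ (by decide), hcond _ (by decide),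
        hcond _ (by decide), hcond _ (by decide), hcond _ (by decide)]
    by_cases h1 : w = ['w','a','l','l']
    · rw [h1]; simp [knownKinds, hu]
    · by_cases h2 : w = ['f','l','o','o','r']
      · rw [h2]; simp [knownKinds, hu]
      · by_cases h3 : w = ['c','e','i','l','i','n','g']
        · rw [h3]; simp [knownKinds, hu]
        · by_cases h4 : w = ['p','r','o','p']
          · rw [h4]; simp [knownKinds, hu]
          · by_cases h5 : w = ['p','l','a','n','e']
            · rw [h5]; simp [knownKinds, hu]
            · by_cases h6 : w = ['c','u','b','e']
              · rw [h6]; simp [knownKinds, hu]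
              · simp [h1, h2, h3, h4, h5, h6, knownKinds]
  · have hfalse : ∀ (l : List Char), '_' ∉ l →
        PySem.Chars.startswith s (l ++ ['_']) = false := by
      intro l hl
      rw [Bool.eq_false_iff]
      intro h
      exact hu ((prefix_underscore_iff s l hl).mp ((PySem.Chars.startswith_iff s _).mp h)).1
    simp only [loopA, typePrefixesA, hsw]
    rw [show ("wall_" : String).toList = ['w','a','l','l'] ++ ['_'] from rfl,
        show ("floor_" : String).toList = ['f','l','o','o','r'] ++ ['_'] from rfl,
        show ("ceiling_" : String).toList = ['c','e','i','l','i','n','g'] ++ ['_'] from rfl,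
        show ("prop_" : String).toList = ['p','r','o','p'] ++ ['_'] from rfl,
        show ("plane_" : String).toList = ['p','l','a','n','e'] ++ ['_'] from rfl,
        show ("cube_" : String).toList = ['c','u','b','e'] ++ ['_'] from rfl,
        hfalse _ (by decide), hfalse _ (by decide), hfalse _ (by decide),
        hfalse _ (by decide), hfalse _ (by decide), hfalse _ (by decide)]
    simp [hu]
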